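-- pv_equiv track=rewrite | github.com/Ani0202/DSA-solved-problems | Bit Manipulation/Different Bits Sum Pairwise.py | cntBits
-- ===== SOURCE A (Python) =====
-- def cntBits(A):
--     n = len(A)
--     ans = 0
--     for i in range(31):
--         s = 0
--         for j in A:
--             if j & (1 << i) > 0:
--                 s += 1
--         ans = (ans + 2 * s * (n - s)) % 1000000007
--     return ans % 1000000007
-- ===== SOURCE B (Python) =====
-- def cntBits(A):
--     ans = 0
--     for x in A:
--         for y in A:
--             ans += ((x ^ y) & 0x7FFFFFFF).bit_count()
--     return ans % 1000000007
-- ===== Notes on version B (the rewrite author's own statement) =====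
-- stated objective: alternative
-- what changed: Replaces A's per-bit-position counting (31 passes computing set-bit counts s and adding 2*s*(n-s)) with a direct double loop over all ordered pairs that sums the popcount of the 31-bit-masked XOR of each pair, taking the modulus once at the end.
import Mathlib
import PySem

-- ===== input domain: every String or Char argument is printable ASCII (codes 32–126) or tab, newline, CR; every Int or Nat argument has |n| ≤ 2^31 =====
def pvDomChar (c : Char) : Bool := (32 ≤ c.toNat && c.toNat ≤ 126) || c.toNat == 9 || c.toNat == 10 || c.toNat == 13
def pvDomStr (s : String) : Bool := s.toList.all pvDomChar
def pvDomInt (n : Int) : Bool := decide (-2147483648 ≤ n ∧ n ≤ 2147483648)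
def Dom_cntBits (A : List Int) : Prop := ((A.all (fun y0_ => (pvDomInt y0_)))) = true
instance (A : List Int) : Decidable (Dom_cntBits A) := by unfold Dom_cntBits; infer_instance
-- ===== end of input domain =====

-- B replaces A's per-bit-position counting with a direct double loop over all ordered
-- pairs, adding the popcount of the 31-bit-masked XOR of each pair (alternative
-- decomposition, same O(31·n) vs O(n²·31) cost trade; not claimed faster).

-- ===== PORT A =====
def cntBits (A : List Int) : Int :=
  let n : Int := (A.length : Int)
  (List.foldl
    (fun (ans : Int) (i : Nat) =>
      let s : Int :=
        List.foldl (fun (s : Int) (j : Int) => if 0 < PySem.Int.band j ((1 : Int) <<< i) then s + 1 else s) 0 A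
      (ans + 2 * s * (n - s)) % 1000000007)
    0 (List.range 31)) % 1000000007

-- ===== PORT B =====
-- `.bit_count()` of the (nonnegative) masked xor, ported via PySem.Int.bitCount (exact here).
def cntBits_alt (A : List Int) : Int :=
  (List.foldl
    (fun ans x =>
      List.foldl
        (fun ans y => ans + (PySem.Int.bitCount (PySem.Int.band (PySem.Int.bxor x y) 2147483647) : Int))
        ans A)
    0 A) % 1000000007

-- ===== PRECONDITION & SPEC =====
def Spec_cntBits (A : List Int) (out : Int) : Prop := out = cntBits_alt A
instance (A : List Int) (out : Int) : Decidable (Spec_cntBits A out) := by unfold Spec_cntBits; infer_instance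

-- ===== CLAIM (what is proved, stated in full; the proofs are below) =====
def Claim_equal_cntBits : Prop := ∀ (A : List Int), Dom_cntBits A → Spec_cntBits A (cntBits A)

-- ===== LEMMAS AND PROOFS =====

-- differing-bit indicator at bit i
def pvInd (i : Nat) (x y : Int) : Int := if x.testBit i ^^ y.testBit i then 1 else 0

-- number of elements of A with bit i set
def pvC (i : Nat) (A : List Int) : Int := (A.countP (fun j => j.testBit i) : Int)

theorem pvInd_symm (i : Nat) (x y : Int) : pvInd i x y = pvInd i y x := by
  simp [pvInd, Bool.xor_comm]

theorem pvInd_self (i : Nat) (x : Int) : pvInd i x x = 0 := by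
  simp [pvInd]

theorem sum_map_add {α : Type} (l : List α) (f g : α → Int) :
    (l.map (fun x => f x + g x)).sum = (l.map f).sum + (l.map g).sum := by
  induction l with
  | nil => simp
  | cons a l ih => simp [ih]; ring

theorem sum_swap {α β : Type} (A : List α) (l : List β) (g : α → β → Int) :
    (A.map (fun x => (l.map (g x)).sum)).sum
      = (l.map (fun i => (A.map (fun x => g x i)).sum)).sum := by
  induction A with
  | nil => simp
  | cons z A ih =>
      simp only [List.map_cons, List.sum_cons, ih]
      rw [← sum_map_add]

-- A's inner loop counts the elements satisfying the test
theorem foldl_fun_congr {α β : Type} (f g : β → α → β) (b : β) (l : List α)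
    (h : ∀ b x, f b x = g b x) : l.foldl f b = l.foldl g b := by
  induction l generalizing b with
  | nil => rfl
  | cons x l ih => simp only [List.foldl_cons, h, ih]

theorem foldA_count (A : List Int) (p : Int → Prop) [DecidablePred p] (s : Int) :
    A.foldl (fun s j => if p j then s + 1 else s) s
      = s + (A.countP (fun j => decide (p j)) : Int) := by
  induction A generalizing s with
  | nil => simp
  | cons a A ih => by_cases h : p a <;> simp [h, ih] <;> ring

-- A's outer loop: fold with a running mod equals mod of the sum
theorem foldA_mod (l : List Nat) (t : Nat → Int) (a : Int) :
    List.foldl (fun ans i => (ans + t i) % 1000000007) (a % 1000000007) l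
      = (a + (l.map t).sum) % 1000000007 := by
  induction l generalizing a with
  | nil => simp
  | cons i l ih =>
      simp only [List.foldl_cons, List.map_cons, List.sum_cons]
      rw [Int.add_emod (a % 1000000007), Int.emod_emod_of_dvd _ dvd_rfl, ← Int.add_emod, ih,
        add_assoc]

-- B's loops are plain sums
theorem foldB_inner (A : List Int) (h : Int → Int) (a : Int) :
    A.foldl (fun ans y => ans + h y) a = a + (A.map h).sum := by
  induction A generalizing a with
  | nil => simp
  | cons y A ih => simp [ih]; ring

theorem foldB_outer (A B : List Int) (h : Int → Int → Int) (a : Int) :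
    B.foldl (fun ans x => A.foldl (fun ans y => ans + h x y) ans) a
      = a + (B.map (fun x => (A.map (h x)).sum)).sum := by
  induction B generalizing a with
  | nil => simp
  | cons x B ih => simp [foldB_inner]; ring

-- ---- bit-level facts ----


theorem band_pow_pos (j : Int) (i : Nat) :
    (0 < PySem.Int.band j ((1 : Int) <<< i)) ↔ j.testBit i = true := by
  have hsh : ((1 : Int) <<< i) = ((2 ^ i : Nat) : Int) := by
    rw [Int.shiftLeft_eq]; push_cast; ring
  rw [hsh]
  cases j with
  | ofNat m =>
      simp only [PySem.Int.band, Int.ofNat_eq_natCast, Int.natCast_nonneg, if_true,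
        Int.toNat_natCast, Int.testBit]
      rw [Nat.and_two_pow]
      cases h : m.testBit i <;> simp
  | negSucc m =>
      have h1 : ¬ (0 : Int) ≤ Int.negSucc m := by omega
      have h2 : (0:Int) ≤ ((2^i : Nat) : Int) := by positivity
      simp only [PySem.Int.band, h1, h2, if_true, if_false]
      have h3 : (-(Int.negSucc m) - 1).toNat = m := by
        simp [Int.negSucc_eq]
      rw [h3, Int.toNat_natCast, Nat.two_pow_and]
      have h4 : Int.testBit (Int.negSucc m) i = !m.testBit i := rfl
      rw [h4]
      have hp : 0 < 2^i := Nat.two_pow_pos i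
      cases h : m.testBit i <;> simp


theorem masked_repr (z : Int) :
    (PySem.Int.band z 2147483647).toNat < 2 ^ 31 ∧
    0 ≤ PySem.Int.band z 2147483647 ∧
    ∀ k, (PySem.Int.band z 2147483647).toNat.testBit k = (decide (k < 31) && z.testBit k) := by
  cases z with
  | ofNat m =>
      have : PySem.Int.band (Int.ofNat m) 2147483647 = ((m &&& (2^31 - 1) : Nat) : Int) := by
        simp [PySem.Int.band]
      rw [this]
      refine ⟨?_, by positivity, ?_⟩
      · rw [Int.toNat_natCast, Nat.and_two_pow_sub_one_eq_mod]
        exact Nat.mod_lt _ (by norm_num)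
      · intro k
        rw [Int.toNat_natCast, Nat.and_two_pow_sub_one_eq_mod, Nat.testBit_mod_two_pow]
        rfl
  | negSucc m =>
      have h1 : ¬ (0 : Int) ≤ Int.negSucc m := by omega
      have h3 : (-(Int.negSucc m) - 1).toNat = m := by simp [Int.negSucc_eq]
      have : PySem.Int.band (Int.negSucc m) 2147483647
          = (((2^31 - 1) - ((2^31 - 1) &&& m) : Nat) : Int) := by
        simp only [PySem.Int.band, h1, if_false, if_pos (by norm_num : (0:Int) ≤ 2147483647), h3]
        rfl
      rw [this]
      have hland : (2^31 - 1) &&& m = m % 2^31 := by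
        rw [Nat.land_comm, Nat.and_two_pow_sub_one_eq_mod]
      have hmod : m % 2^31 < 2^31 := Nat.mod_lt _ (by norm_num)
      have hsub : (2^31 - 1) - m % 2^31 = 2^31 - (m % 2^31 + 1) := by omega
      refine ⟨?_, by positivity, ?_⟩
      · rw [Int.toNat_natCast]; omega
      · intro k
        rw [Int.toNat_natCast, hland, hsub, Nat.testBit_two_pow_sub_succ hmod,
          Nat.testBit_mod_two_pow]
        have : Int.testBit (Int.negSucc m) k = !m.testBit k := rfl
        rw [this]
        cases hk : decide (k < 31) <;> cases hb : m.testBit k <;> simp_all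

theorem bxor_testBit (x y : Int) (k : Nat) :
    (PySem.Int.bxor x y).testBit k = (x.testBit k ^^ y.testBit k) := by
  have hns : ∀ n : Nat, (-(n:Int) - 1) = Int.negSucc n := by intro n; simp [Int.negSucc_eq]; ring
  cases x with
  | ofNat a =>
      cases y with
      | ofNat b =>
          have : PySem.Int.bxor (Int.ofNat a) (Int.ofNat b) = ((a ^^^ b : Nat) : Int) := by
            simp [PySem.Int.bxor]
          rw [this]
          show (a ^^^ b).testBit k = _
          rw [Nat.testBit_xor]; rfl
      | negSucc b =>
          have h3 : (-(Int.negSucc b) - 1).toNat = b := by simp [Int.negSucc_eq]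
          have : PySem.Int.bxor (Int.ofNat a) (Int.negSucc b) = Int.negSucc (a ^^^ b) := by
            simp only [PySem.Int.bxor, Int.ofNat_eq_natCast, Int.natCast_nonneg, if_true, h3,
              if_neg (by omega : ¬ (0:Int) ≤ Int.negSucc b), Int.toNat_natCast]
            rw [hns]
          rw [this]
          show (!(a ^^^ b).testBit k) = (a.testBit k ^^ !b.testBit k)
          rw [Nat.testBit_xor]
          cases a.testBit k <;> cases b.testBit k <;> rfl
  | negSucc a =>
      have h3 : (-(Int.negSucc a) - 1).toNat = a := by simp [Int.negSucc_eq]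
      cases y with
      | ofNat b =>
          have : PySem.Int.bxor (Int.negSucc a) (Int.ofNat b) = Int.negSucc (a ^^^ b) := by
            simp only [PySem.Int.bxor, Int.ofNat_eq_natCast, Int.natCast_nonneg, if_true, h3,
              if_neg (by omega : ¬ (0:Int) ≤ Int.negSucc a), Int.toNat_natCast]
            rw [hns]
          rw [this]
          show (!(a ^^^ b).testBit k) = (!a.testBit k ^^ b.testBit k)
          rw [Nat.testBit_xor]
          cases a.testBit k <;> cases b.testBit k <;> rfl
      | negSucc b =>
          have h4 : (-(Int.negSucc b) - 1).toNat = b := by simp [Int.negSucc_eq]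
          have : PySem.Int.bxor (Int.negSucc a) (Int.negSucc b) = ((a ^^^ b : Nat) : Int) := by
            simp only [PySem.Int.bxor, h3, h4,
              if_neg (by omega : ¬ (0:Int) ≤ Int.negSucc a),
              if_neg (by omega : ¬ (0:Int) ≤ Int.negSucc b)]
          rw [this]
          show (a ^^^ b).testBit k = (!a.testBit k ^^ !b.testBit k)
          rw [Nat.testBit_xor]
          cases a.testBit k <;> cases b.testBit k <;> rfl


theorem bitCount_sum_bits (k : Nat) : ∀ m : Nat, m < 2 ^ k →
    ((PySem.Int.bitCount (m : Int) : Nat) : Int)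
      = ((List.range k).map (fun i => if m.testBit i then (1 : Int) else 0)).sum := by
  induction k with
  | zero =>
      intro m hm
      interval_cases m
      simp [PySem.Int.bitCount_zero]
  | succ k ih =>
      intro m hm
      rcases Nat.eq_zero_or_pos m with h0 | h0
      · subst h0; simp [PySem.Int.bitCount_zero, Nat.zero_testBit]
      · rw [PySem.Int.bitCount_natCast h0, List.range_succ_eq_map]
        simp only [List.map_cons, List.sum_cons, List.map_map]
        have hhead : (if m.testBit 0 then (1:Int) else 0) = ((m % 2 : Nat) : Int) := by
          rw [Nat.testBit_zero]
          rcases Nat.mod_two_eq_zero_or_one m with h | h <;> simp [h]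
        have htail : ((List.range k).map ((fun i => if m.testBit i then (1:Int) else 0) ∘ Nat.succ)).sum
            = ((List.range k).map (fun i => if (m / 2).testBit i then (1:Int) else 0)).sum := by
          apply congrArg; apply List.map_congr_left; intro i _
          simp [Function.comp, Nat.testBit_succ]
        rw [htail, ← ih (m / 2) (by omega), hhead]
        push_cast
        ring

-- the pairwise popcount term decomposes into the 31 per-bit indicators
theorem pop_eq_sum_ind (x y : Int) :
    ((PySem.Int.bitCount (PySem.Int.band (PySem.Int.bxor x y) 2147483647) : Nat) : Int)
      = ((List.range 31).map (fun i => pvInd i x y)).sum := by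
  have h1 : PySem.Int.band (PySem.Int.bxor x y) 2147483647
      = (((PySem.Int.band (PySem.Int.bxor x y) 2147483647).toNat : Nat) : Int) :=
    (Int.toNat_of_nonneg (masked_repr _).2.1).symm
  rw [h1, bitCount_sum_bits 31 _ (masked_repr _).1]
  apply congrArg
  apply List.map_congr_left
  intro i hi
  have hi' : i < 31 := List.mem_range.mp hi
  rw [(masked_repr _).2.2, bxor_testBit]
  simp [pvInd, hi']

-- one row of the pairwise sum at bit i
theorem row_sum (i : Nat) (z : Int) (A : List Int) :
    (A.map (pvInd i z)).sum
      = if z.testBit i then (A.length : Int) - pvC i A else pvC i A := by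
  induction A with
  | nil => simp [pvC]
  | cons a A ih =>
      simp only [List.map_cons, List.sum_cons, ih, pvC, List.countP_cons, pvInd, List.length_cons]
      by_cases hz : z.testBit i <;> by_cases ha : a.testBit i <;>
        simp [hz, ha] <;> ring

-- the full pairwise sum at bit i
theorem pair_sum (i : Nat) (A : List Int) :
    (A.map (fun x => (A.map (pvInd i x)).sum)).sum
      = 2 * pvC i A * ((A.length : Int) - pvC i A) := by
  induction A with
  | nil => simp [pvC]
  | cons z A ih =>
      have expand : ∀ x : Int, ((z :: A).map (pvInd i x)).sum = pvInd i x z + (A.map (pvInd i x)).sum := by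
        intro x; simp
      simp only [List.map_cons, List.sum_cons]
      rw [sum_map_add, ih, pvInd_self]
      have hz : (A.map (fun x => pvInd i x z)).sum = (A.map (pvInd i z)).sum := by
        apply congrArg; apply List.map_congr_left; intro x _; rw [pvInd_symm]
      rw [hz, row_sum]
      have hc : pvC i (z :: A) = pvC i A + (if z.testBit i then 1 else 0) := by
        simp only [pvC, List.countP_cons]
        by_cases h : z.testBit i <;> simp [h]
      rw [hc]
      have hn : ((z :: A).length : Int) = (A.length : Int) + 1 := by simp
      rw [hn]
      by_cases h : z.testBit i <;> simp [h] <;> ring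

-- ===== VERDICT (by name: the statement is the Claim_ definition above) =====
theorem cntBits_spec : Claim_equal_cntBits := by
  intro A _
  unfold Spec_cntBits cntBits cntBits_alt
  have hfold : ∀ i : Nat,
      List.foldl (fun s j => if 0 < PySem.Int.band j ((1 : Int) <<< i) then s + 1 else s) (0:Int) A
        = pvC i A := by
    intro i
    rw [foldA_count]
    simp only [zero_add, pvC]
    congr 1
    apply List.countP_congr
    intro j _
    simp [band_pow_pos]
  have hA : (List.foldl
      (fun (ans : Int) (i : Nat) =>
        let s : Int :=
          List.foldl (fun (s : Int) (j : Int) => if 0 < PySem.Int.band j ((1 : Int) <<< i) then s + 1 else s) 0 A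
        (ans + 2 * s * ((A.length : Int) - s)) % 1000000007)
      0 (List.range 31))
      = ((List.range 31).map (fun i => 2 * pvC i A * ((A.length : Int) - pvC i A))).sum % 1000000007 := by
    rw [foldl_fun_congr _
      (fun ans i => (ans + 2 * pvC i A * ((A.length : Int) - pvC i A)) % 1000000007) _ _
      (by intro b i; simp only [hfold])]
    have h0 : (0 : Int) = 0 % 1000000007 := by decide
    rw [h0, foldA_mod]
    simp
  have hB : (List.foldl
      (fun ans x =>
        List.foldl
          (fun ans y => ans + (PySem.Int.bitCount (PySem.Int.band (PySem.Int.bxor x y) 2147483647) : Int))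
          ans A) 0 A)
      = ((List.range 31).map (fun i => 2 * pvC i A * ((A.length : Int) - pvC i A))).sum := by
    rw [foldB_outer]
    simp only [zero_add]
    calc (A.map (fun x => (A.map (fun y => (PySem.Int.bitCount (PySem.Int.band (PySem.Int.bxor x y) 2147483647) : Int))).sum)).sum
        = (A.map (fun x => (A.map (fun y => ((List.range 31).map (fun i => pvInd i x y)).sum)).sum)).sum := by
          apply congrArg; apply List.map_congr_left; intro x _
          apply congrArg; apply List.map_congr_left; intro y _
          exact pop_eq_sum_ind x y
      _ = (A.map (fun x => ((List.range 31).map (fun i => (A.map (fun y => pvInd i x y)).sum)).sum)).sum := by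
          apply congrArg; apply List.map_congr_left; intro x _
          exact sum_swap A (List.range 31) (fun y i => pvInd i x y)
      _ = ((List.range 31).map (fun i => (A.map (fun x => (A.map (fun y => pvInd i x y)).sum)).sum)).sum := by
          exact sum_swap A (List.range 31) (fun x i => (A.map (fun y => pvInd i x y)).sum)
      _ = ((List.range 31).map (fun i => 2 * pvC i A * ((A.length : Int) - pvC i A))).sum := by
          apply congrArg; apply List.map_congr_left; intro i _
          exact pair_sum i A
  simp only [hA, hB, Int.emod_emod_of_dvd _ dvd_rfl]
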